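-- pv_equiv track=rewrite | github.com/JeffreyMaurer/Code_Challenges | 24/permutations.py | permutations_helper
-- ===== SOURCE A (Python) =====
-- def permutations_helper(elements,result_list,d):
--     if d<0:
--         yield tuple(result_list)
--     else:
--         for i in elements:
--             result_list[d]=i
--             all_permutations = permutations_helper(elements,result_list,d-1)#this is generator
--             for g in all_permutations:
--                 yield g
-- ===== SOURCE B (Python) =====
-- # B: iterative level-by-level (breadth-first) Cartesian-product build instead of A's
-- # recursive depth-first generator.  Return-value equivalence only: A mutates
-- # result_list in place, B never touches it.
-- def permutations_helper(elements, result_list, d):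
--     lists = [list(result_list)]
--     p = d
--     while p >= 0 and lists:
--         lists = [l[:p] + [e] + l[p + 1:] for l in lists for e in elements]
--         p -= 1
--     for l in lists:
--         yield tuple(l)
-- ===== Notes on version B (the rewrite author's own statement) =====
-- stated objective: alternative
-- what changed: Replaced A's recursive depth-first generator (which mutates result_list in place and recurses per position) with an iterative breadth-first build: one worklist of candidate lists, extended level by level for positions d down to 0 via a product comprehension; B does not mutate result_list (return-value equivalence only).
import Mathlib
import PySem

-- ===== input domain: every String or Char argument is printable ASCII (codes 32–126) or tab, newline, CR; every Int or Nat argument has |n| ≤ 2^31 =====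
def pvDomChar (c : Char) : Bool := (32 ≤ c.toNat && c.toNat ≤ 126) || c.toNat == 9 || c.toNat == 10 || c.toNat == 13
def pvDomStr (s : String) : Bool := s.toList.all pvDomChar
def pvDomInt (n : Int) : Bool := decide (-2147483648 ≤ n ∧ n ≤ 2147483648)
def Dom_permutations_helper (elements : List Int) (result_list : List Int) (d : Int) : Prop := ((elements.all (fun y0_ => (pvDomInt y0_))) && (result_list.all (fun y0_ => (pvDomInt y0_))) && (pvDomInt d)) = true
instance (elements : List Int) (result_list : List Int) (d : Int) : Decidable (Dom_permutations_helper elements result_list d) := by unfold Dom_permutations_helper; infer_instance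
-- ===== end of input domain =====

-- B is a breadth-first iterative rebuild of A's depth-first recursive generator; equivalence is about
-- the RETURN value only (Python A mutates result_list in place, Python B does not).

-- ===== PORT A =====
-- A's generator, collected into a list; the mutation of result_list is threaded as the second
-- component of the result ("yielded tuples so far" × "current result_list state").
-- result_list[d] = i is exact as List.set d.toNat i inside Pre_ (there 0 ≤ d < result_list.length).
def permA (elements : List Int) (result_list : List Int) (d : Int) : List (List Int) × List Int :=
  if d < 0 then ([result_list], result_list)
  else elements.foldl (fun s i =>
    let rl := s.2.set d.toNat i
    let r := permA elements rl (d - 1)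
    (s.1 ++ r.1, r.2)) ([], result_list)
termination_by (d + 1).toNat
decreasing_by omega

def permutations_helper (elements : List Int) (result_list : List Int) (d : Int) : List (List Int) :=
  (permA elements result_list d).1

-- ===== PORT B =====
-- Source B's while loop: extend every candidate list at position p, for p = d, d-1, …, 0.
-- l[:p] / l[p+1:] are exact as take/drop because here 0 ≤ p.
def altLoop (elements : List Int) (lists : List (List Int)) (p : Int) : List (List Int) :=
  if h : 0 ≤ p ∧ lists ≠ [] then
    altLoop elements
      (lists.flatMap (fun l => elements.map (fun e => l.take p.toNat ++ [e] ++ l.drop (p.toNat + 1))))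
      (p - 1)
  else lists
termination_by (p + 1).toNat
decreasing_by omega

def permutations_helper_alt (elements : List Int) (result_list : List Int) (d : Int) : List (List Int) :=
  -- lists = [list(result_list)]; while-loop; the trailing "yield tuple(l) for l in lists" is the identity here
  altLoop elements [result_list] d

-- ===== PRECONDITION & SPEC =====
-- Pre_ excludes exactly the inputs where Python A raises IndexError: a nonempty elements list with
-- d ≥ len(result_list) (the assignment result_list[d] = i is then out of range).
def Pre_permutations_helper (elements : List Int) (result_list : List Int) (d : Int) : Prop :=
  elements = [] ∨ d < (result_list.length : Int)
instance (elements : List Int) (result_list : List Int) (d : Int) : Decidable (Pre_permutations_helper elements result_list d) := by unfold Pre_permutations_helper; infer_instance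

def pvWitness_permutations_helper : List Int × List Int × Int := ([1, 2], [0, 0], 1)

def Spec_permutations_helper (elements : List Int) (result_list : List Int) (d : Int) (out : List (List Int)) : Prop := out = permutations_helper_alt elements result_list d
instance (elements : List Int) (result_list : List Int) (d : Int) (out : List (List Int)) : Decidable (Spec_permutations_helper elements result_list d out) := by unfold Spec_permutations_helper; infer_instance

-- ===== CLAIM (what is proved, stated in full; the proofs are below) =====
def Claim_equal_permutations_helper : Prop := ∀ (elements : List Int) (result_list : List Int) (d : Int), Dom_permutations_helper elements result_list d → Pre_permutations_helper elements result_list d → Spec_permutations_helper elements result_list d (permutations_helper elements result_list d)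

-- ===== LEMMAS AND PROOFS =====

theorem altLoop_nil (e : List Int) (p : Int) : altLoop e [] p = [] := by
  unfold altLoop; simp

theorem altLoop_step (e : List Int) (L : List (List Int)) (p : Int) (hp : 0 ≤ p) (hL : L ≠ []) :
    altLoop e L p =
      altLoop e (L.flatMap (fun l => e.map (fun x => l.take p.toNat ++ [x] ++ l.drop (p.toNat + 1)))) (p - 1) := by
  rw [altLoop, dif_pos ⟨hp, hL⟩]

theorem altLoop_append (e : List Int) (L1 L2 : List (List Int)) (p : Int) :
    altLoop e (L1 ++ L2) p = altLoop e L1 p ++ altLoop e L2 p := by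
  by_cases hp : 0 ≤ p
  · induction hn : (p + 1).toNat generalizing L1 L2 p with
    | zero => omega
    | succ n ih =>
      rcases hL1 : L1 with _ | ⟨a, L1'⟩
      · simp [altLoop_nil]
      · rcases hL2 : L2 with _ | ⟨b, L2'⟩
        · simp [altLoop_nil]
        · rw [← hL1, ← hL2]
          have h1 : L1 ≠ [] := by simp [hL1]
          have h2 : L2 ≠ [] := by simp [hL2]
          have h12 : L1 ++ L2 ≠ [] := by simp [hL1]
          rw [altLoop_step e (L1 ++ L2) p hp h12, altLoop_step e L1 p hp h1,
              altLoop_step e L2 p hp h2, List.flatMap_append]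
          by_cases hp' : 0 ≤ p - 1
          · exact ih _ _ _ hp' (by omega)
          · have hstop : ∀ L : List (List Int), altLoop e L (p - 1) = L := by
              intro L; rw [altLoop, dif_neg (by intro h; exact hp' h.1)]
            rw [hstop, hstop, hstop]
  · have hstop : ∀ L : List (List Int), altLoop e L p = L := by
      intro L; rw [altLoop, dif_neg (by intro h; exact hp h.1)]
    rw [hstop, hstop, hstop]

theorem altLoop_flat (e : List Int) (L : List (List Int)) (p : Int) :
    altLoop e L p = L.flatMap (fun l => altLoop e [l] p) := by
  induction L with
  | nil => simp [altLoop_nil]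
  | cons a t ih =>
    have : a :: t = [a] ++ t := rfl
    rw [this, altLoop_append, ih]; simp

-- positions ≥ k agree after setting position k, provided lengths agree and positions > k agree
theorem drop_set_eq (k : Nat) (a : Int) (l1 l2 : List Int)
    (hlen : l1.length = l2.length) (hdrop : l1.drop (k + 1) = l2.drop (k + 1)) :
    (l1.set k a).drop k = (l2.set k a).drop k := by
  apply List.ext_getElem
  · simp [hlen]
  · intro i h1 h2
    simp only [List.getElem_drop, List.getElem_set]
    by_cases hi : i = 0
    · subst hi; simp
    · have hk1 : k + 1 ≤ k + i := by omega
      have e1 : l1.length - (k+1) = l2.length - (k+1) := by omega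
      have g1 : (k + i) = (k + 1) + (i - 1) := by omega
      have hlt1 : i - 1 < l1.length - (k + 1) := by
        simp [List.length_set] at h1; omega
      have hlt2 : i - 1 < l2.length - (k + 1) := by omega
      have := congrArg (fun L => L[i-1]?) hdrop
      simp only [List.getElem?_drop] at this
      have hv : l1[(k+1)+(i-1)]? = l2[(k+1)+(i-1)]? := this
      rw [if_neg (by omega : ¬ (k = k + i)), if_neg (by omega : ¬ (k = k + i))]
      have hA : l1[k + i] = l2[k + i] := by
        have hx1 : k + i < l1.length := by simp [List.length_set] at h1; omega
        have hx2 : k + i < l2.length := by omega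
        have hq : l1[k + i]? = l2[k + i]? := by rw [g1]; exact hv
        rw [List.getElem?_eq_getElem hx1, List.getElem?_eq_getElem hx2] at hq
        exact Option.some.inj hq
      exact hA

-- the main induction: invariance of A's output/state under the values at positions ≤ d,
-- plus (inside Pre_) equality with B's loop
theorem permA_main (e : List Int) :
    ∀ n : Nat, ∀ d : Int, (d + 1).toNat = n →
    ∀ rl1 rl2 : List Int, rl1.length = rl2.length → rl1.drop (d + 1).toNat = rl2.drop (d + 1).toNat →
      ((permA e rl1 d).1 = (permA e rl2 d).1) ∧
      ((permA e rl1 d).2.length = rl1.length) ∧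
      ((permA e rl1 d).2.drop (d + 1).toNat = rl1.drop (d + 1).toNat) ∧
      ((e ≠ [] → d < (rl1.length : Int)) → (permA e rl1 d).1 = altLoop e [rl1] d) := by
  intro n
  induction n with
  | zero =>
    intro d hd rl1 rl2 hlen hdrop
    have hdneg : d < 0 := by omega
    have h0 : (d + 1).toNat = 0 := hd
    rw [permA, if_pos hdneg, permA, if_pos hdneg]
    have : rl1 = rl2 := by simpa [h0] using hdrop
    refine ⟨by simp [this], by simp, by simp, ?_⟩
    intro _
    rw [altLoop, dif_neg (by simp; omega)]
  | succ n ih =>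
    intro d hd rl1 rl2 hlen hdrop
    have hd0 : 0 ≤ d := by omega
    have hdn : d.toNat = n := by omega
    have hdd : ((d - 1) + 1).toNat = n := by omega
    have hsucc : (d + 1).toNat = d.toNat + 1 := by omega
    -- the foldl step lemma, with rlr the reference list
    have inner : ∀ (rlr : List Int) (rest : List Int) (acc : List (List Int)) (rl' : List Int),
        rl'.length = rlr.length → rl'.drop (d.toNat + 1) = rlr.drop (d.toNat + 1) →
        (List.foldl (fun s i =>
            let rl := s.2.set d.toNat i
            let r := permA e rl (d - 1)
            (s.1 ++ r.1, r.2)) (acc, rl') rest).1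
            = acc ++ rest.flatMap (fun i => (permA e (rlr.set d.toNat i) (d - 1)).1) ∧
        (List.foldl (fun s i =>
            let rl := s.2.set d.toNat i
            let r := permA e rl (d - 1)
            (s.1 ++ r.1, r.2)) (acc, rl') rest).2.length = rl'.length ∧
        (List.foldl (fun s i =>
            let rl := s.2.set d.toNat i
            let r := permA e rl (d - 1)
            (s.1 ++ r.1, r.2)) (acc, rl') rest).2.drop (d.toNat + 1) = rl'.drop (d.toNat + 1) := by
      intro rlr rest
      induction rest with
      | nil => intro acc rl' h1 h2; simp
      | cons i rest ihr =>
        intro acc rl' h1 h2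
        simp only [List.foldl_cons]
        have hset : (rl'.set d.toNat i).drop ((d - 1) + 1).toNat = (rlr.set d.toNat i).drop ((d - 1) + 1).toNat := by
          have : ((d - 1) + 1).toNat = d.toNat := by omega
          rw [this]
          exact drop_set_eq d.toNat i rl' rlr h1 h2
        have hsetlen : (rl'.set d.toNat i).length = (rlr.set d.toNat i).length := by
          simp [h1]
        have hIH := ih (d - 1) hdd (rl'.set d.toNat i) (rlr.set d.toNat i) hsetlen hset
        obtain ⟨hO, hL, hD, _⟩ := hIH
        -- state after this iteration
        set rl'' := (permA e (rl'.set d.toNat i) (d - 1)).2 with hrl''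
        have hlen'' : rl''.length = rl'.length := by
          rw [hrl'', hL]; simp
        have hdrop'' : rl''.drop (d.toNat + 1) = rl'.drop (d.toNat + 1) := by
          have h3 : ((d - 1) + 1).toNat = d.toNat := by omega
          have := hD; rw [h3] at this
          -- rl''.drop d.toNat = (rl'.set d.toNat i).drop d.toNat ; take one more drop
          have := congrArg (fun L => L.drop 1) this
          simp only [List.drop_drop] at this
          rw [(by omega : d.toNat + 1 = 1 + d.toNat)] at *
          rw [this]
          rw [List.drop_set_of_lt (by omega : d.toNat < 1 + d.toNat)]
        have hrec := ihr (acc ++ (permA e (rl'.set d.toNat i) (d - 1)).1) rl''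
          (by rw [hlen'', h1]) (by rw [hdrop'', h2])
        refine ⟨?_, ?_, ?_⟩
        · rw [hrec.1, hO]; simp
        · rw [hrec.2.1, hlen'']
        · rw [hrec.2.2, hdrop'']
    have hA1 : permA e rl1 d = List.foldl (fun s i =>
        let rl := s.2.set d.toNat i
        let r := permA e rl (d - 1)
        (s.1 ++ r.1, r.2)) ([], rl1) e := by
      rw [permA, if_neg (by omega)]
    have hA2 : permA e rl2 d = List.foldl (fun s i =>
        let rl := s.2.set d.toNat i
        let r := permA e rl (d - 1)
        (s.1 ++ r.1, r.2)) ([], rl2) e := by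
      rw [permA, if_neg (by omega)]
    have hdropd : rl1.drop (d.toNat + 1) = rl2.drop (d.toNat + 1) := by
      rw [← hsucc] at *; exact hdrop
    have i1 := inner rl1 e [] rl1 rfl rfl
    have i2 := inner rl1 e [] rl2 (by omega) (by rw [hdropd])
    refine ⟨?_, ?_, ?_, ?_⟩
    · rw [hA1, hA2, i1.1, i2.1]
    · rw [hA1]; exact i1.2.1
    · rw [hA1, hsucc]; exact i1.2.2
    · intro hpre
      rw [hA1, i1.1, List.nil_append]
      -- B's side: one altLoop step then distribute over the product
      have hstep := altLoop_step e [rl1] d hd0 (by simp)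
      rw [hstep]
      have hfm : ([rl1] : List (List Int)).flatMap
          (fun l => e.map (fun x => l.take d.toNat ++ [x] ++ l.drop (d.toNat + 1)))
          = e.map (fun x => rl1.take d.toNat ++ [x] ++ rl1.drop (d.toNat + 1)) := by
        simp
      rw [hfm, altLoop_flat, List.flatMap_map]
      apply List.flatMap_congr
      intro i hi
      have hne : e ≠ [] := by intro h; rw [h] at hi; simp at hi
      have hdlen : d < (rl1.length : Int) := hpre hne
      have hdlt : d.toNat < rl1.length := by omega
      have hsetform : rl1.take d.toNat ++ [i] ++ rl1.drop (d.toNat + 1) = rl1.set d.toNat i := by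
        rw [List.set_eq_take_append_cons_drop, if_pos hdlt]
        simp
      rw [hsetform]
      have hIH := ih (d - 1) hdd (rl1.set d.toNat i) (rl1.set d.toNat i) rfl rfl
      exact hIH.2.2.2 (fun _ => by simp; omega)

-- ===== VERDICT (by name: the statement is the Claim_ definition above) =====
theorem permutations_helper_spec : Claim_equal_permutations_helper := by
  intro elements result_list d _ hpre
  unfold Spec_permutations_helper permutations_helper permutations_helper_alt
  have h := permA_main elements ((d + 1).toNat) d rfl result_list result_list rfl rfl
  apply h.2.2.2
  intro hne
  rcases hpre with h1 | h1
  · exact absurd h1 hne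
  · exact h1
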